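-- pv_equiv track=rewrite | github.com/tliakos/vas | vassal_framework/templates/units_ww2.py | allied_axis_classifier
-- ===== SOURCE A (Python) =====
-- ALLIED_PREFIXES = [
--     'US-', 'UK-', 'GB-', 'SU-', 'FR-', 'PL-', 'CA-', 'AU-', 'NZ-',
-- ]
--
-- AXIS_PREFIXES = [
--     'GE-', 'IT-', 'JP-', 'HU-', 'RO-', 'FN-', 'BG-',
-- ]
--
-- def allied_axis_classifier(image_filename):
--     """Classify a piece as Allied or Axis based on image filename prefix."""
--     if not image_filename:
--         return 'Unknown'
--     for prefix in ALLIED_PREFIXES: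
--         if image_filename.startswith(prefix):
--             return 'Allied'
--     for prefix in AXIS_PREFIXES:
--         if image_filename.startswith(prefix):
--             return 'Axis'
--     return 'Unknown'
-- ===== SOURCE B (Python) =====
-- # Decision-tree reimplementation: instead of scanning prefix lists, check the
-- # "CC-" shape directly and classify the two-letter country code with a nested
-- # character decision tree (branch on the first letter, then the second).
--
-- def _classify_code(a, b):
--     if a == 'U':
--         if b == 'S' or b == 'K':
--             return 'Allied'
--     elif a == 'G':
--         if b == 'B':
--             return 'Allied'
--         if b == 'E':
--             return 'Axis'
--     elif a == 'S':
--         if b == 'U':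
--             return 'Allied'
--     elif a == 'F':
--         if b == 'R':
--             return 'Allied'
--         if b == 'N':
--             return 'Axis'
--     elif a == 'P':
--         if b == 'L':
--             return 'Allied'
--     elif a == 'C':
--         if b == 'A':
--             return 'Allied'
--     elif a == 'A':
--         if b == 'U':
--             return 'Allied'
--     elif a == 'N':
--         if b == 'Z':
--             return 'Allied'
--     elif a == 'I':
--         if b == 'T':
--             return 'Axis'
--     elif a == 'J':
--         if b == 'P':
--             return 'Axis'
--     elif a == 'H':
--         if b == 'U':
--             return 'Axis'
--     elif a == 'R':
--         if b == 'O':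
--             return 'Axis'
--     elif a == 'B':
--         if b == 'G':
--             return 'Axis'
--     return 'Unknown'
--
-- def allied_axis_classifier(image_filename):
--     """Classify a piece as Allied or Axis based on image filename prefix."""
--     if len(image_filename) < 3 or image_filename[2] != '-':
--         return 'Unknown'
--     return _classify_code(image_filename[0], image_filename[1])
-- ===== Notes on version B (the rewrite author's own statement) =====
-- stated objective: alternative
-- what changed: Replaces the two prefix-list scanning loops with a shape check (third character is '-') followed by a nested character decision tree on the two-letter country code (branch on the first letter, then the second), using no prefix lists or string comparisons at all.
import Mathlib
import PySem

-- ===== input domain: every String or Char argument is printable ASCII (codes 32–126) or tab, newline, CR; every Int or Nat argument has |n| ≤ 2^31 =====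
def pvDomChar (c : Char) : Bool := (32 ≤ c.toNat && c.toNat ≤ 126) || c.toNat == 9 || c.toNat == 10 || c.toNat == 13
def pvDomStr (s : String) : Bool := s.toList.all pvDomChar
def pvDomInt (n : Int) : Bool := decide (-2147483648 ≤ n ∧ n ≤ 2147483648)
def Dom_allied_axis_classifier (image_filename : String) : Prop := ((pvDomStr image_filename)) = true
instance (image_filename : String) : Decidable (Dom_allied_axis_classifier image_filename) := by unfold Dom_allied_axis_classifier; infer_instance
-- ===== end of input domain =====

-- B replaces A's two prefix-list scanning loops with a "CC-" shape check plus a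
-- nested character decision tree on the two-letter country code (alternative).

-- ===== PORT A =====
def ALLIED_PREFIXES : List String :=
  ["US-", "UK-", "GB-", "SU-", "FR-", "PL-", "CA-", "AU-", "NZ-"]

def AXIS_PREFIXES : List String :=
  ["GE-", "IT-", "JP-", "HU-", "RO-", "FN-", "BG-"]

-- the 'for prefix in …: if image_filename.startswith(prefix): return …' loop
def prefixLoop (s : String) : List String → Bool
  | [] => false
  | p :: rest => if PySem.Str.startswith s p then true else prefixLoop s rest

def allied_axis_classifier (image_filename : String) : String :=
  if image_filename = "" then "Unknown"
  else if prefixLoop image_filename ALLIED_PREFIXES then "Allied"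
  else if prefixLoop image_filename AXIS_PREFIXES then "Axis"
  else "Unknown"

-- ===== PORT B =====
-- _classify_code(a, b): nested if/elif decision tree on the two letters
def classifyCode (a b : Char) : String :=
  if a = 'U' then (if b = 'S' ∨ b = 'K' then "Allied" else "Unknown")
  else if a = 'G' then (if b = 'B' then "Allied" else if b = 'E' then "Axis" else "Unknown")
  else if a = 'S' then (if b = 'U' then "Allied" else "Unknown")
  else if a = 'F' then (if b = 'R' then "Allied" else if b = 'N' then "Axis" else "Unknown")
  else if a = 'P' then (if b = 'L' then "Allied" else "Unknown")
  else if a = 'C' then (if b = 'A' then "Allied" else "Unknown")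
  else if a = 'A' then (if b = 'U' then "Allied" else "Unknown")
  else if a = 'N' then (if b = 'Z' then "Allied" else "Unknown")
  else if a = 'I' then (if b = 'T' then "Axis" else "Unknown")
  else if a = 'J' then (if b = 'P' then "Axis" else "Unknown")
  else if a = 'H' then (if b = 'U' then "Axis" else "Unknown")
  else if a = 'R' then (if b = 'O' then "Axis" else "Unknown")
  else if a = 'B' then (if b = 'G' then "Axis" else "Unknown")
  else "Unknown"

-- 'if len(s) < 3 or s[2] != '-': return "Unknown"' then classify s[0], s[1];
-- the match arm a :: b :: c :: _ is exactly len(s) ≥ 3 with s[0]=a, s[1]=b, s[2]=c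
def allied_axis_classifier_alt (image_filename : String) : String :=
  match image_filename.toList with
  | a :: b :: c :: _ => if c ≠ '-' then "Unknown" else classifyCode a b
  | _ => "Unknown"

-- ===== PRECONDITION & SPEC =====
def Spec_allied_axis_classifier (image_filename : String) (out : String) : Prop := out = allied_axis_classifier_alt image_filename
instance (image_filename : String) (out : String) : Decidable (Spec_allied_axis_classifier image_filename out) := by unfold Spec_allied_axis_classifier; infer_instance

-- ===== CLAIM (what is proved, stated in full; the proofs are below) =====
def Claim_equal_allied_axis_classifier : Prop := ∀ (image_filename : String), Dom_allied_axis_classifier image_filename → Spec_allied_axis_classifier image_filename (allied_axis_classifier image_filename)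

-- ===== LEMMAS AND PROOFS =====

theorem startswith_eq_decide (l p : List Char) :
    PySem.Chars.startswith l p = decide (p <+: l) := by
  by_cases hp : p <+: l
  · simp [hp, (PySem.Chars.startswith_iff l p).mpr hp]
  · simp [hp, Bool.eq_false_iff.mpr (fun h => hp ((PySem.Chars.startswith_iff l p).mp h))]

theorem core (a b : Char) :
    (if 'U' = a ∧ 'S' = b ∨ 'U' = a ∧ 'K' = b ∨ 'G' = a ∧ 'B' = b ∨ 'S' = a ∧ 'U' = b ∨ 'F' = a ∧ 'R' = b ∨ 'P' = a ∧ 'L' = b ∨ 'C' = a ∧ 'A' = b ∨ 'A' = a ∧ 'U' = b ∨ 'N' = a ∧ 'Z' = b then "Allied"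
     else if 'G' = a ∧ 'E' = b ∨ 'I' = a ∧ 'T' = b ∨ 'J' = a ∧ 'P' = b ∨ 'H' = a ∧ 'U' = b ∨ 'R' = a ∧ 'O' = b ∨ 'F' = a ∧ 'N' = b ∨ 'B' = a ∧ 'G' = b then "Axis"
     else "Unknown") = classifyCode a b := by
  by_cases h0 : 'U' = a
  · subst h0
    by_cases k0 : 'S' = b
    · subst k0; decide
    · by_cases k1 : 'K' = b
      · subst k1; decide
      · simp [classifyCode, k0, Ne.symm k0, k1, Ne.symm k1]
  by_cases h1 : 'G' = a
  · subst h1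
    by_cases k0 : 'B' = b
    · subst k0; decide
    · by_cases k1 : 'E' = b
      · subst k1; decide
      · simp [classifyCode, k0, Ne.symm k0, k1, Ne.symm k1]
  by_cases h2 : 'S' = a
  · subst h2
    by_cases k0 : 'U' = b
    · subst k0; decide
    · simp [classifyCode, k0, Ne.symm k0]
  by_cases h3 : 'F' = a
  · subst h3
    by_cases k0 : 'R' = b
    · subst k0; decide
    · by_cases k1 : 'N' = b
      · subst k1; decide
      · simp [classifyCode, k0, Ne.symm k0, k1, Ne.symm k1]
  by_cases h4 : 'P' = a
  · subst h4
    by_cases k0 : 'L' = b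
    · subst k0; decide
    · simp [classifyCode, k0, Ne.symm k0]
  by_cases h5 : 'C' = a
  · subst h5
    by_cases k0 : 'A' = b
    · subst k0; decide
    · simp [classifyCode, k0, Ne.symm k0]
  by_cases h6 : 'A' = a
  · subst h6
    by_cases k0 : 'U' = b
    · subst k0; decide
    · simp [classifyCode, k0, Ne.symm k0]
  by_cases h7 : 'N' = a
  · subst h7
    by_cases k0 : 'Z' = b
    · subst k0; decide
    · simp [classifyCode, k0, Ne.symm k0]
  by_cases h8 : 'I' = a
  · subst h8
    by_cases k0 : 'T' = b
    · subst k0; decide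
    · simp [classifyCode, k0, Ne.symm k0]
  by_cases h9 : 'J' = a
  · subst h9
    by_cases k0 : 'P' = b
    · subst k0; decide
    · simp [classifyCode, k0, Ne.symm k0]
  by_cases h10 : 'H' = a
  · subst h10
    by_cases k0 : 'U' = b
    · subst k0; decide
    · simp [classifyCode, k0, Ne.symm k0]
  by_cases h11 : 'R' = a
  · subst h11
    by_cases k0 : 'O' = b
    · subst k0; decide
    · simp [classifyCode, k0, Ne.symm k0]
  by_cases h12 : 'B' = a
  · subst h12
    by_cases k0 : 'G' = b
    · subst k0; decide
    · simp [classifyCode, k0, Ne.symm k0]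
  simp [classifyCode, h0, h1, h2, h3, h4, h5, h6, h7, h8, h9, h10, h11, h12, Ne.symm h0, Ne.symm h1, Ne.symm h2, Ne.symm h3, Ne.symm h4, Ne.symm h5, Ne.symm h6, Ne.symm h7, Ne.symm h8, Ne.symm h9, Ne.symm h10, Ne.symm h11, Ne.symm h12]

-- ===== VERDICT (by name: the statement is the Claim_ definition above) =====
set_option maxHeartbeats 1000000 in
theorem allied_axis_classifier_spec : Claim_equal_allied_axis_classifier := by
  intro s _
  show _ = _
  unfold allied_axis_classifier allied_axis_classifier_alt
  by_cases hs : s = ""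
  · subst hs; decide
  rw [if_neg hs]
  simp only [ALLIED_PREFIXES, AXIS_PREFIXES, prefixLoop, PySem.Str.startswith_eq,
    startswith_eq_decide]
  rcases hl : s.toList with _ | ⟨a, _ | ⟨b, _ | ⟨c, rest⟩⟩⟩
  · exact absurd (String.toList_inj.mp (by simp [hl])) hs
  · simp
  · simp
  · by_cases hc : '-' = c
    · subst hc
      simpa using core a b
    · simp [hc, Ne.symm hc]
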